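-- pv_equiv track=rewrite | github.com/Rohitrky2021/JavaSourceCode | =EXAMTIME/1_TradeDesk/Cycle T  Shift 2Array v1 and v2/p.py | helper
-- ===== SOURCE A (Python) =====
-- def helper(v):
--     n = len(v)
--     arr1, arr2 = [v[0]], [v[1]]
--
--     for i in range(2, n):
--         ans1 = sum(1 for x in arr1 if x > v[i])
--         temp = sum(1 for x in arr2 if x > v[i])
--
--         if ans1 > temp:
--             arr1.append(v[i])
--         elif temp > ans1:
--             arr2.append(v[i])
--         else:
--             if len(arr1) <= len(arr2):
--                 arr1.append(v[i])
--             else: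
--                 arr2.append(v[i])
--
--     arr1.extend(arr2)
--     return arr1
-- ===== SOURCE B (Python) =====
-- def _pos_desc(s, x):
--     # s is sorted in non-increasing order; return the first index i with s[i] <= x,
--     # i.e. the number of elements of s strictly greater than x (binary search).
--     lo, hi = 0, len(s)
--     while lo < hi:
--         mid = (lo + hi) // 2
--         if s[mid] > x:
--             lo = mid + 1
--         else:
--             hi = mid
--     return lo
--
--
-- def helper(v):
--     arr1, arr2 = [v[0]], [v[1]]
--     s1, s2 = [v[0]], [v[1]]  # sorted (non-increasing) mirrors of arr1 / arr2
--     for x in v[2:]: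
--         c1 = _pos_desc(s1, x)
--         c2 = _pos_desc(s2, x)
--         if c1 > c2 or (c1 == c2 and len(arr1) <= len(arr2)):
--             arr1.append(x)
--             s1.insert(c1, x)
--         else:
--             arr2.append(x)
--             s2.insert(c2, x)
--     return arr1 + arr2
-- ===== Notes on version B (the rewrite author's own statement) =====
-- stated objective: faster
-- what changed: B maintains a descending-sorted mirror of each partition and obtains the count of strictly larger elements by one binary search per step (the same index also being the insertion point), instead of rescanning both partitions with a linear generator each iteration.
import Mathlib
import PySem

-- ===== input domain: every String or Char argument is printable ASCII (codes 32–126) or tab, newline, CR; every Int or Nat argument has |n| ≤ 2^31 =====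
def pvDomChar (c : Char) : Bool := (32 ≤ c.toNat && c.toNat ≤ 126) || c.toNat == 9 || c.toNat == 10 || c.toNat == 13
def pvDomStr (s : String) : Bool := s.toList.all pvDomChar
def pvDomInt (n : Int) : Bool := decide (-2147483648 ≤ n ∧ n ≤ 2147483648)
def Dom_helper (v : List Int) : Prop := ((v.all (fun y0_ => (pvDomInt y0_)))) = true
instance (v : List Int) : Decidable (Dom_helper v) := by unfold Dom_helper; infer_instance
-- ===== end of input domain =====

-- B maintains a descending-sorted mirror of each partition and gets the "count of larger
-- elements" by one binary search per step (the found index is also the insertion point),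
-- instead of rescanning both partitions linearly each iteration (measured faster).

-- ===== PORT A =====
-- the body of A's for-loop (named for the proofs; code is A's, branch for branch)
def stepA (st : List Int × List Int) (vi : Int) : List Int × List Int :=
  let ans1 : Int := (st.1.map (fun x => if vi < x then (1 : Int) else 0)).sum  -- sum(1 for x in arr1 if x > v[i])
  let temp : Int := (st.2.map (fun x => if vi < x then (1 : Int) else 0)).sum
  if temp < ans1 then (st.1 ++ [vi], st.2)
  else if ans1 < temp then (st.1, st.2 ++ [vi])
  else if st.1.length ≤ st.2.length then (st.1 ++ [vi], st.2)
  else (st.1, st.2 ++ [vi])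

-- literal transliteration of A: index loop over range(2, n), v[i] via pyGetD (in range there)
def helper (v : List Int) : List Int :=
  let n : Int := v.length
  let st := (PySem.List.pyRange 2 n 1).foldl
      (fun st i => stepA st (PySem.List.pyGetD v i 0))
      ([PySem.List.pyGetD v 0 0], [PySem.List.pyGetD v 1 0])   -- v[0], v[1]; Pre_ gives 2 ≤ len
  st.1 ++ st.2

-- ===== PORT B =====
-- _pos_desc: binary search on a descending-sorted list; first index with s[mid] ≤ x
-- (the fuel argument only bounds the iteration count — hi - lo shrinks each pass, so
--  fuel = hi - lo runs the while-loop to completion; it changes no computed value)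
def posDescGo : Nat → List Int → Int → Nat → Nat → Nat
  | 0, _, _, lo, _ => lo
  | fuel + 1, s, x, lo, hi =>
    if lo < hi then
      let mid := (lo + hi) / 2
      if x < s.getD mid 0 then posDescGo fuel s x (mid + 1) hi   -- s[mid] > x
      else posDescGo fuel s x lo mid
    else lo

def posDesc (s : List Int) (x : Int) (lo hi : Nat) : Nat := posDescGo (hi - lo) s x lo hi

-- the body of B's for-loop: state (arr1, arr2, s1, s2), one binary search per mirror,
-- insert at the found index (s.insert(c, x) → insertIdx, exact for 0 ≤ c ≤ len)
def stepB (st : List Int × List Int × List Int × List Int) (x : Int) :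
    List Int × List Int × List Int × List Int :=
  let c1 := posDesc st.2.2.1 x 0 st.2.2.1.length
  let c2 := posDesc st.2.2.2 x 0 st.2.2.2.length
  if c2 < c1 || (c1 == c2 && st.1.length ≤ st.2.1.length) then
    (st.1 ++ [x], st.2.1, st.2.2.1.insertIdx c1 x, st.2.2.2)
  else
    (st.1, st.2.1 ++ [x], st.2.2.1, st.2.2.2.insertIdx c2 x)

-- literal transliteration of B: fold over v[2:] (= drop 2: nonnegative start, exact)
def helper_alt (v : List Int) : List Int :=
  match v with
  | a :: b :: rest =>
    let st := rest.foldl stepB ([a], [b], [a], [b])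
    st.1 ++ st.2.1
  | _ => []    -- unreachable under Pre_ (v[0]/v[1] raise IndexError in Python)

-- ===== PRECONDITION & SPEC =====
-- A (and B) raise IndexError on lists of length < 2 (v[0]/v[1]): exactly those are excluded.
def Pre_helper (v : List Int) : Prop := 2 ≤ v.length
instance (v : List Int) : Decidable (Pre_helper v) := by unfold Pre_helper; infer_instance
def pvWitness_helper : List Int := [3, 1, 2]

def Spec_helper (v : List Int) (out : List Int) : Prop := out = helper_alt v
instance (v : List Int) (out : List Int) : Decidable (Spec_helper v out) := by unfold Spec_helper; infer_instance

-- ===== CLAIM (what is proved, stated in full; the proofs are below) =====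
def Claim_equal_helper : Prop := ∀ (v : List Int), Dom_helper v → Pre_helper v → Spec_helper v (helper v)

-- ===== LEMMAS AND PROOFS =====

-- on a non-increasing list, getD is antitone
theorem getD_anti (s : List Int) (hs : s.Pairwise (· ≥ ·)) (i j : Nat)
    (hij : i ≤ j) (hj : j < s.length) : s.getD j 0 ≤ s.getD i 0 := by
  have hi : i < s.length := lt_of_le_of_lt hij hj
  rcases Nat.lt_or_ge i j with h | h
  · have := List.pairwise_iff_getElem.mp hs i j hi hj h
    simpa [List.getD_eq_getElem?_getD, List.getElem?_eq_getElem, hi, hj] using this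
  · have : i = j := le_antisymm hij h
    subst this; exact le_refl _

-- binary-search invariant: the result r splits s into a strict-greater prefix and a ≤ suffix
theorem posDescGo_spec (s : List Int) (x : Int) (hs : s.Pairwise (· ≥ ·)) :
    ∀ n lo hi, hi - lo ≤ n → lo ≤ hi → hi ≤ s.length →
      (∀ j, j < lo → x < s.getD j 0) →
      (∀ j, hi ≤ j → j < s.length → s.getD j 0 ≤ x) →
      lo ≤ posDescGo n s x lo hi ∧ posDescGo n s x lo hi ≤ hi ∧
      (∀ j, j < posDescGo n s x lo hi → x < s.getD j 0) ∧
      (∀ j, posDescGo n s x lo hi ≤ j → j < s.length → s.getD j 0 ≤ x) := by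
  intro n
  induction n with
  | zero =>
    intro lo hi h0 hle hlen H1 H2
    simp only [posDescGo]
    exact ⟨le_refl _, hle, H1, by
      intro j hj hjl
      exact H2 j (by omega) hjl⟩
  | succ n ih =>
    intro lo hi h0 hle hlen H1 H2
    by_cases h : lo < hi
    · have hmlo : lo ≤ (lo + hi) / 2 := by omega
      have hmhi : (lo + hi) / 2 < hi := by omega
      by_cases hx : x < s.getD ((lo + hi) / 2) 0
      · have heq : posDescGo (n + 1) s x lo hi = posDescGo n s x ((lo + hi) / 2 + 1) hi := by
          simp only [posDescGo]
          rw [if_pos h, if_pos hx]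
        obtain ⟨k1, k2, k3, k4⟩ := ih ((lo + hi) / 2 + 1) hi (by omega) (by omega) hlen
          (by
            intro j hj
            rcases Nat.lt_or_ge j lo with hjlo | hjlo
            · exact H1 j hjlo
            · have hjlen : j < s.length := by omega
              have := getD_anti s hs j ((lo + hi) / 2) (by omega) (by omega)
              omega)
          H2
        rw [heq]
        exact ⟨by omega, k2, k3, k4⟩
      · have heq : posDescGo (n + 1) s x lo hi = posDescGo n s x lo ((lo + hi) / 2) := by
          simp only [posDescGo]
          rw [if_pos h, if_neg hx]
        obtain ⟨k1, k2, k3, k4⟩ := ih lo ((lo + hi) / 2) (by omega) (by omega) (by omega) H1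
          (by
            intro j hj hjl
            have := getD_anti s hs ((lo + hi) / 2) j hj hjl
            omega)
        rw [heq]
        exact ⟨k1, by omega, k3, k4⟩
    · have heq : posDescGo (n + 1) s x lo hi = lo := by
        simp only [posDescGo]
        rw [if_neg h]
      rw [heq]
      exact ⟨le_refl _, hle, H1, fun j hj hjl => H2 j (by omega) hjl⟩

theorem posDesc_full (s : List Int) (x : Int) (hs : s.Pairwise (· ≥ ·)) :
    posDesc s x 0 s.length ≤ s.length ∧
    (∀ j, j < posDesc s x 0 s.length → x < s.getD j 0) ∧
    (∀ j, posDesc s x 0 s.length ≤ j → j < s.length → s.getD j 0 ≤ x) := by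
  have h := posDescGo_spec s x hs (s.length - 0) 0 s.length (by omega) (Nat.zero_le _) le_rfl
    (fun j hj => absurd hj (Nat.not_lt_zero j)) (fun j hj hjl => absurd hjl (by omega))
  exact ⟨h.2.1, h.2.2.1, h.2.2.2⟩

-- the binary search counts the elements strictly greater than x
theorem posDesc_count (s : List Int) (x : Int) (hs : s.Pairwise (· ≥ ·)) :
    posDesc s x 0 s.length = s.countP (fun y => decide (x < y)) := by
  obtain ⟨hle, h1, h2⟩ := posDesc_full s x hs
  have hsplit : s.countP (fun y => decide (x < y)) =
      (s.take (posDesc s x 0 s.length)).countP (fun y => decide (x < y)) +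
      (s.drop (posDesc s x 0 s.length)).countP (fun y => decide (x < y)) := by
    conv_lhs => rw [← List.take_append_drop (posDesc s x 0 s.length) s]
    rw [List.countP_append]
  have ht : (s.take (posDesc s x 0 s.length)).countP (fun y => decide (x < y)) =
      (s.take (posDesc s x 0 s.length)).length := by
    apply List.countP_eq_length.mpr
    intro a ha
    obtain ⟨i, hi, hia⟩ := List.getElem_of_mem ha
    have hir : i < posDesc s x 0 s.length := by
      have := hi; rw [List.length_take] at this; omega
    have hilen : i < s.length := by omega
    rw [List.getElem_take] at hia
    have := h1 i hir
    rw [List.getD_eq_getElem?_getD, List.getElem?_eq_getElem hilen] at this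
    simp only [Option.getD_some] at this
    subst hia
    simpa using this
  have hd : (s.drop (posDesc s x 0 s.length)).countP (fun y => decide (x < y)) = 0 := by
    apply List.countP_eq_zero.mpr
    intro a ha
    obtain ⟨i, hi, hia⟩ := List.getElem_of_mem ha
    have hlen2 : posDesc s x 0 s.length + i < s.length := by
      have := hi; rw [List.length_drop] at this; omega
    rw [List.getElem_drop] at hia
    have := h2 (posDesc s x 0 s.length + i) (by omega) hlen2
    rw [List.getD_eq_getElem?_getD, List.getElem?_eq_getElem hlen2] at this
    simp only [Option.getD_some] at this
    subst hia
    simpa using this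
  rw [hsplit, ht, hd, List.length_take]
  omega

theorem insertIdx_decomp (x : Int) : ∀ (r : Nat) (s : List Int), r ≤ s.length →
    s.insertIdx r x = s.take r ++ x :: s.drop r := by
  intro r
  induction r with
  | zero => intro s _; simp
  | succ r ih =>
    intro s hr
    cases s with
    | nil => simp at hr
    | cons y ys =>
      simp only [List.insertIdx_succ_cons, List.take_succ_cons, List.drop_succ_cons,
        List.cons_append]
      rw [ih ys (by simpa using hr)]

theorem insertIdx_sorted (s : List Int) (x : Int) (hs : s.Pairwise (· ≥ ·))
    (r : Nat) (hr : r ≤ s.length)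
    (h1 : ∀ j, j < r → x < s.getD j 0)
    (h2 : ∀ j, r ≤ j → j < s.length → s.getD j 0 ≤ x) :
    (s.insertIdx r x).Pairwise (· ≥ ·) := by
  have hmem_take : ∀ a ∈ s.take r, x < a := by
    intro a ha
    obtain ⟨i, hi, hia⟩ := List.getElem_of_mem ha
    have hir : i < r := by have := hi; rw [List.length_take] at this; omega
    have hilen : i < s.length := by omega
    rw [List.getElem_take] at hia
    have := h1 i hir
    rw [List.getD_eq_getElem?_getD, List.getElem?_eq_getElem hilen] at this
    simpa [hia] using this
  have hmem_drop : ∀ a ∈ s.drop r, a ≤ x := by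
    intro a ha
    obtain ⟨i, hi, hia⟩ := List.getElem_of_mem ha
    have hlen2 : r + i < s.length := by have := hi; rw [List.length_drop] at this; omega
    rw [List.getElem_drop] at hia
    have := h2 (r + i) (by omega) hlen2
    rw [List.getD_eq_getElem?_getD, List.getElem?_eq_getElem hlen2] at this
    simpa [hia] using this
  rw [insertIdx_decomp x r s hr, List.pairwise_append]
  refine ⟨hs.sublist (List.take_sublist r s), ?_, ?_⟩
  · rw [List.pairwise_cons]
    exact ⟨fun b hb => hmem_drop b hb, hs.sublist (List.drop_sublist r s)⟩
  · intro a ha b hb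
    rcases List.mem_cons.mp hb with rfl | hb
    · exact le_of_lt (hmem_take a ha)
    · exact le_of_lt (lt_of_le_of_lt (hmem_drop b hb) (hmem_take a ha))

-- inserting at the binary-search index keeps the mirror a sorted permutation of arr ++ [x]
theorem mirror_insert (s arr : List Int) (x : Int) (hp : s.Perm arr) (hs : s.Pairwise (· ≥ ·)) :
    (s.insertIdx (posDesc s x 0 s.length) x).Perm (arr ++ [x]) ∧
    (s.insertIdx (posDesc s x 0 s.length) x).Pairwise (· ≥ ·) := by
  obtain ⟨hle, h1, h2⟩ := posDesc_full s x hs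
  constructor
  · exact (List.perm_insertIdx x s hle).trans ((hp.cons x).trans (List.perm_append_singleton x arr).symm)
  · exact insertIdx_sorted s x hs _ hle h1 h2

-- A's 0/1-sum equals the mirror's binary-search count (via countP and the permutation)
theorem sumA_eq_pos (s arr : List Int) (x : Int) (hp : s.Perm arr) (hs : s.Pairwise (· ≥ ·)) :
    (arr.map (fun y => if x < y then (1 : Int) else 0)).sum = (posDesc s x 0 s.length : Int) := by
  rw [posDesc_count s x hs, hp.countP_eq]
  simpa using PySem.List.sum_map_ite_one_zero (fun y => decide (x < y)) arr

-- the loop invariant: running B's loop and projecting the two partitions gives A's loop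
theorem loop_inv (l : List Int) : ∀ (a1 a2 s1 s2 : List Int),
    s1.Perm a1 → s1.Pairwise (· ≥ ·) → s2.Perm a2 → s2.Pairwise (· ≥ ·) →
    l.foldl stepA (a1, a2) =
      ((l.foldl stepB (a1, a2, s1, s2)).1, (l.foldl stepB (a1, a2, s1, s2)).2.1) := by
  induction l with
  | nil => intro a1 a2 s1 s2 _ _ _ _; simp
  | cons x t ih =>
    intro a1 a2 s1 s2 hp1 hs1 hp2 hs2
    simp only [List.foldl_cons]
    have hc1 := sumA_eq_pos s1 a1 x hp1 hs1
    have hc2 := sumA_eq_pos s2 a2 x hp2 hs2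
    have hm1 := mirror_insert s1 a1 x hp1 hs1
    have hm2 := mirror_insert s2 a2 x hp2 hs2
    set c1 := posDesc s1 x 0 s1.length with hc1def
    set c2 := posDesc s2 x 0 s2.length with hc2def
    rcases Nat.lt_trichotomy c2 c1 with hlt | heq | hgt
    · have hA : stepA (a1, a2) x = (a1 ++ [x], a2) := by
        simp only [stepA]
        rw [hc1, hc2]
        simp [Nat.cast_lt, hlt]
      have hB : stepB (a1, a2, s1, s2) x = (a1 ++ [x], a2, s1.insertIdx c1 x, s2) := by
        simp only [stepB]
        rw [← hc1def, ← hc2def]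
        simp [hlt]
      rw [hA, hB]
      exact ih (a1 ++ [x]) a2 (s1.insertIdx c1 x) s2 hm1.1 hm1.2 hp2 hs2
    · by_cases hlen : a1.length ≤ a2.length
      · have hA : stepA (a1, a2) x = (a1 ++ [x], a2) := by
          simp only [stepA]
          rw [hc1, hc2]
          simp [heq, hlen]
        have hB : stepB (a1, a2, s1, s2) x = (a1 ++ [x], a2, s1.insertIdx c1 x, s2) := by
          simp only [stepB]
          rw [← hc1def, ← hc2def]
          simp [heq, hlen]
        rw [hA, hB]
        exact ih (a1 ++ [x]) a2 (s1.insertIdx c1 x) s2 hm1.1 hm1.2 hp2 hs2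
      · have hA : stepA (a1, a2) x = (a1, a2 ++ [x]) := by
          simp only [stepA]
          rw [hc1, hc2]
          simp [heq, hlen]
        have hB : stepB (a1, a2, s1, s2) x = (a1, a2 ++ [x], s1, s2.insertIdx c2 x) := by
          simp only [stepB]
          rw [← hc1def, ← hc2def]
          simp [heq, hlen]
        rw [hA, hB]
        exact ih a1 (a2 ++ [x]) s1 (s2.insertIdx c2 x) hp1 hs1 hm2.1 hm2.2
    · have hA : stepA (a1, a2) x = (a1, a2 ++ [x]) := by
        simp only [stepA]
        rw [hc1, hc2]
        simp [Nat.cast_lt, hgt, Nat.lt_asymm hgt]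
      have hB : stepB (a1, a2, s1, s2) x = (a1, a2 ++ [x], s1, s2.insertIdx c2 x) := by
        simp only [stepB]
        rw [← hc1def, ← hc2def]
        simp [Nat.lt_asymm hgt, Nat.ne_of_lt hgt]
      rw [hA, hB]
      exact ih a1 (a2 ++ [x]) s1 (s2.insertIdx c2 x) hp1 hs1 hm2.1 hm2.2

theorem helper_spec : Claim_equal_helper := by
  intro v _ hpre
  unfold Spec_helper
  match v, hpre with
  | a :: b :: rest, _ =>
    have hfold := PySem.List.foldl_pyRange_pyGetD' (a :: b :: rest) 0 stepA
        ([PySem.List.pyGetD (a :: b :: rest) 0 0], [PySem.List.pyGetD (a :: b :: rest) 1 0])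
        (a := 2) (by norm_num)
    have hloop := loop_inv rest [a] [b] [a] [b] (List.Perm.refl _) (List.pairwise_singleton _ _)
        (List.Perm.refl _) (List.pairwise_singleton _ _)
    simp only [helper, helper_alt]
    rw [hfold]
    norm_num
    have h0 : PySem.List.pyGetD (a :: b :: rest) 0 0 = a := by
      simp [PySem.List.pyGetD_ofNat']
    have h1 : PySem.List.pyGetD (a :: b :: rest) 1 0 = b := by
      simp [PySem.List.pyGetD_ofNat']
    rw [h1]
    simp only [show Int.toNat 2 = 2 from rfl, List.drop_succ_cons, List.drop_zero]
    rw [hloop]
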